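-- pv_equiv track=rewrite | github.com/Pawnnwap/purple-gold-gourd | purple_gold_gourd/config.py | _match_model_limit
-- ===== SOURCE A (Python) =====
-- def _match_model_limit(model_id: str, limits: dict[str, int], default: int) -> int:
--     if not limits:
--         return default
--     aliases = _model_aliases(model_id)
--     for key, value in limits.items():
--         if aliases & _model_aliases(key):
--             return value
--     for key, value in limits.items():
--         lowered = key.strip().lower()
--         if any(alias in lowered or lowered in alias for alias in aliases):
--             return value
--     return default
--
-- def _model_aliases(model_id: str) -> set[str]:
--     lowered = (model_id or "").strip().lower()
--     if not lowered:
--         return set()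
--     aliases = {
--         lowered,
--         lowered.replace(".", "-"),
--         lowered.replace("_", "-"),
--         lowered.replace(".", ""),
--         lowered.replace("-", ""),
--         lowered.replace("_", ""),
--     }
--     return {alias for alias in aliases if alias}
-- ===== SOURCE B (Python) =====
-- def _alias_list(model_id):
--     lowered = (model_id or "").strip().lower()
--     out = []
--     if lowered:
--         for cand in (lowered,
--                      lowered.replace(".", "-"),
--                      lowered.replace("_", "-"),
--                      lowered.replace(".", ""),
--                      lowered.replace("-", ""),
--                      lowered.replace("_", "")):
--             if cand and cand not in out:
--                 out.append(cand)
--     return out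
--
--
-- def _match_model_limit(model_id: str, limits: dict[str, int], default: int) -> int:
--     aliases = _alias_list(model_id)
--
--     def rank(key):
--         key_aliases = _alias_list(key)
--         if any(a in key_aliases for a in aliases):
--             return 0
--         lowered = key.strip().lower()
--         if any(a in lowered or lowered in a for a in aliases):
--             return 1
--         return 2
--
--     best_rank, best_value = 2, default
--     for key, value in limits.items():
--         r = rank(key)
--         if r < best_rank:
--             best_rank, best_value = r, value
--         if best_rank == 0:
--             break
--     return best_value
-- ===== Notes on version B (the rewrite author's own statement) =====
-- stated objective: alternative
-- what changed: Replaces A's set-intersection helper plus two staged scans by a dedup-list alias helper and a single rank-then-keep-first-minimum fold: each key is ranked 0 (exact alias match), 1 (substring match) or 2, and the value of the first minimally-ranked key is returned (default if none beats rank 2).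
import Mathlib
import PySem

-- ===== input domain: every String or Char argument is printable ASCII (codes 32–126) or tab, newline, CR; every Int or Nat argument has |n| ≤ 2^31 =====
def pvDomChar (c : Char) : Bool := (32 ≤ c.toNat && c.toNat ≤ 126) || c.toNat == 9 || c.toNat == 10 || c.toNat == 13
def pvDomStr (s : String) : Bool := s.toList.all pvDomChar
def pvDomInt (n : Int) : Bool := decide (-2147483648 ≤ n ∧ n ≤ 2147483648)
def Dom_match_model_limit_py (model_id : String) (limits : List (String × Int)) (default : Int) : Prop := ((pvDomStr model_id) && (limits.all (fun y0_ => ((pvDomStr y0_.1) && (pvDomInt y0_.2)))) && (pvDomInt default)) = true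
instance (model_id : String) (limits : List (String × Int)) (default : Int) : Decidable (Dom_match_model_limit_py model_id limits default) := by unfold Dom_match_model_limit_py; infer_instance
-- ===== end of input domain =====

-- B replaces A's two staged scans by a rank-each-key-then-keep-first-minimum pass; same results ('alternative', not measured faster).


-- ===== PORT A =====
-- _model_aliases, as A writes it: a set built from the six rewrites, empties filtered out
def pvAliases (model_id : String) : PySem.Set String :=
  let lowered := PySem.Str.lower (PySem.Str.strip model_id)
  if lowered = "" then PySem.Set.empty
  else
    let base := PySem.Set.ofList
      [ lowered
      , PySem.Str.replace lowered "." "-"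
      , PySem.Str.replace lowered "_" "-"
      , PySem.Str.replace lowered "." ""
      , PySem.Str.replace lowered "-" ""
      , PySem.Str.replace lowered "_" "" ]
    PySem.Set.ofList (base.filter (fun a => !(a = ""))) -- {alias for alias in aliases if alias}

-- truthiness of 'aliases & _model_aliases(key)'
def pvExactHit (aliases : PySem.Set String) (key : String) : Bool :=
  !(PySem.Set.inter aliases (pvAliases key)).isEmpty

-- 'any(alias in lowered or lowered in alias for alias in aliases)' with lowered = key.strip().lower()
def pvSubHit (aliases : PySem.Set String) (key : String) : Bool :=
  let lowered := PySem.Str.lower (PySem.Str.strip key)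
  aliases.any (fun al => PySem.Str.isIn al lowered || PySem.Str.isIn lowered al)

-- A's first loop: return on the first exact alias match
def pvFindExact (aliases : PySem.Set String) : List (String × Int) → Option Int
  | [] => none
  | (k, v) :: t => if pvExactHit aliases k then some v else pvFindExact aliases t

-- A's second loop: return on the first substring match
def pvFindSub (aliases : PySem.Set String) : List (String × Int) → Option Int
  | [] => none
  | (k, v) :: t => if pvSubHit aliases k then some v else pvFindSub aliases t

def match_model_limit_py (model_id : String) (limits : List (String × Int)) (default : Int) : Int :=
  if limits = [] then default
  else
    let aliases := pvAliases model_id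
    match pvFindExact aliases limits with
    | some v => v
    | none =>
      match pvFindSub aliases limits with
      | some v => v
      | none => default

-- ===== PORT B =====
-- B's _alias_list: the six candidates appended in order, skipping empties and duplicates
def pvAliasList (model_id : String) : List String :=
  let lowered := PySem.Str.lower (PySem.Str.strip model_id)
  if lowered = "" then []
  else
    [ lowered
    , PySem.Str.replace lowered "." "-"
    , PySem.Str.replace lowered "_" "-"
    , PySem.Str.replace lowered "." ""
    , PySem.Str.replace lowered "-" ""
    , PySem.Str.replace lowered "_" "" ].foldl
      (fun out cand => if cand ≠ "" ∧ cand ∉ out then out ++ [cand] else out) []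

-- B's rank(key): 0 = exact alias match, 1 = substring match, 2 = no match
def pvRank (aliases : List String) (key : String) : Nat :=
  let keyAliases := pvAliasList key
  if aliases.any (fun a => keyAliases.contains a) then 0
  else
    let lowered := PySem.Str.lower (PySem.Str.strip key)
    if aliases.any (fun a => PySem.Str.isIn a lowered || PySem.Str.isIn lowered a) then 1
    else 2

-- B's loop: keep the first key of minimal rank; stop early once rank 0 (the minimum) is held
def pvLoop (aliases : List String) : List (String × Int) → Nat × Int → Nat × Int
  | [], best => best
  | (k, v) :: t, best =>
    let r := pvRank aliases k
    let best' := if r < best.1 then (r, v) else best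
    if best'.1 = 0 then best' else pvLoop aliases t best'

def match_model_limit_py_alt (model_id : String) (limits : List (String × Int)) (default : Int) : Int :=
  let aliases := pvAliasList model_id
  (pvLoop aliases limits (2, default)).2

-- ===== PRECONDITION & SPEC =====
def Spec_match_model_limit_py (model_id : String) (limits : List (String × Int)) (default : Int) (out : Int) : Prop := out = match_model_limit_py_alt model_id limits default
instance (model_id : String) (limits : List (String × Int)) (default : Int) (out : Int) : Decidable (Spec_match_model_limit_py model_id limits default out) := by unfold Spec_match_model_limit_py; infer_instance

-- ===== CLAIM (what is proved, stated in full; the proofs are below) =====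
def Claim_equal_match_model_limit_py : Prop := ∀ (model_id : String) (limits : List (String × Int)) (default : Int), Dom_match_model_limit_py model_id limits default → Spec_match_model_limit_py model_id limits default (match_model_limit_py model_id limits default)

-- ===== LEMMAS AND PROOFS =====

set_option maxHeartbeats 800000

-- membership in B's dedup-append fold
theorem mem_aliasFold (cs : List String) (acc : List String) (x : String) :
    x ∈ cs.foldl (fun out cand => if cand ≠ "" ∧ cand ∉ out then out ++ [cand] else out) acc ↔
      x ∈ acc ∨ (x ≠ "" ∧ x ∈ cs) := by
  induction cs generalizing acc with
  | nil => simp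
  | cons c t ih =>
    simp only [List.foldl_cons, List.mem_cons]
    by_cases h : c ≠ "" ∧ c ∉ acc
    · rw [if_pos h, ih]
      simp only [List.mem_append, List.mem_singleton]
      constructor
      · rintro (⟨hx | rfl⟩ | h2) <;> tauto
      · rintro (hx | ⟨hne, rfl | hx⟩) <;> tauto
    · rw [if_neg h, ih]
      rw [not_and_or, not_not] at h
      constructor
      · rintro (hx | h2) <;> tauto
      · rintro (hx | ⟨hne, rfl | hx⟩)
        · tauto
        · rcases h with h | h
          · exact absurd h hne
          · exact Or.inl (not_not.mp h)
        · tauto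

-- B's alias list and A's alias set carry the same elements
theorem mem_aliasList (m : String) (x : String) : x ∈ pvAliasList m ↔ x ∈ pvAliases m := by
  unfold pvAliasList pvAliases
  by_cases h : PySem.Str.lower (PySem.Str.strip m) = ""
  · rw [if_pos h, if_pos h]
    exact Iff.rfl
  · rw [if_neg h, if_neg h, mem_aliasFold, PySem.Set.mem_ofList, List.mem_filter,
      PySem.Set.mem_ofList]
    constructor
    · rintro (hx | ⟨hne, hx⟩)
      · exact absurd hx (List.not_mem_nil)
      · exact ⟨hx, by simpa using hne⟩
    · rintro ⟨hx, hne⟩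
      exact Or.inr ⟨by simpa using hne, hx⟩

-- B's rank decomposes into A's two hit tests
theorem rank_eq (m k : String) :
    pvRank (pvAliasList m) k =
      if pvExactHit (pvAliases m) k then 0
      else if pvSubHit (pvAliases m) k then 1 else 2 := by
  unfold pvRank pvExactHit pvSubHit
  have hex : ((pvAliasList m).any (fun a => (pvAliasList k).contains a)) =
      (!(PySem.Set.inter (pvAliases m) (pvAliases k)).isEmpty) := by
    rw [Bool.eq_iff_iff, List.any_eq_true, Bool.not_eq_eq_eq_not, Bool.not_true,
      List.isEmpty_eq_false_iff_exists_mem]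
    constructor
    · rintro ⟨a, ha, hc⟩
      refine ⟨a, (PySem.Set.mem_inter _ _ _).mpr ?_⟩
      exact ⟨(mem_aliasList m a).1 ha, (mem_aliasList k a).1 (by simpa using hc)⟩
    · rintro ⟨a, ha⟩
      rcases (PySem.Set.mem_inter _ _ _).mp ha with ⟨h1, h2⟩
      exact ⟨a, (mem_aliasList m a).2 h1, by simpa using (mem_aliasList k a).2 h2⟩
  have hsub : ∀ f : String → Bool, (pvAliasList m).any f = (pvAliases m).any f := by
    intro f
    rw [Bool.eq_iff_iff, List.any_eq_true, List.any_eq_true]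
    exact ⟨fun ⟨a, ha, hf⟩ => ⟨a, (mem_aliasList m a).1 ha, hf⟩,
      fun ⟨a, ha, hf⟩ => ⟨a, (mem_aliasList m a).2 ha, hf⟩⟩
  dsimp only
  rw [hex, hsub]

-- a helper: the rank of a key in each of the three hit cases
theorem rank_cases (m k : String) :
    (pvExactHit (pvAliases m) k = true → pvRank (pvAliasList m) k = 0) ∧
    (¬ pvExactHit (pvAliases m) k = true → pvSubHit (pvAliases m) k = true → pvRank (pvAliasList m) k = 1) ∧
    (¬ pvExactHit (pvAliases m) k = true → ¬ pvSubHit (pvAliases m) k = true → pvRank (pvAliasList m) k = 2) := by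
  refine ⟨fun he => ?_, fun he hs => ?_, fun he hs => ?_⟩
  · rw [rank_eq, if_pos he]
  · rw [rank_eq, if_neg he, if_pos hs]
  · rw [rank_eq, if_neg he, if_neg hs]

-- from best rank 1, only a later exact match replaces (and then the loop stops)
theorem loop1 (m : String) (l : List (String × Int)) (w : Int) :
    pvLoop (pvAliasList m) l (1, w) =
      match pvFindExact (pvAliases m) l with
      | some v => (0, v)
      | none => (1, w) := by
  induction l generalizing w with
  | nil => rfl
  | cons kv t ih =>
    obtain ⟨k, v⟩ := kv
    by_cases he : pvExactHit (pvAliases m) k = true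
    · have h0 := (rank_cases m k).1 he
      simp [pvLoop, pvFindExact, h0, he]
    · have h12 : pvRank (pvAliasList m) k = 1 ∨ pvRank (pvAliasList m) k = 2 := by
        by_cases hs : pvSubHit (pvAliases m) k = true
        · exact Or.inl ((rank_cases m k).2.1 he hs)
        · exact Or.inr ((rank_cases m k).2.2 he hs)
      have : pvLoop (pvAliasList m) ((k, v) :: t) (1, w) = pvLoop (pvAliasList m) t (1, w) := by
        rcases h12 with h | h <;> simp [pvLoop, h]
      rw [this, ih]
      simp [pvFindExact, he]

-- from the initial (2, default): the first exact match wins, else the first substring match, else default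
theorem loop2 (m : String) (l : List (String × Int)) (d : Int) :
    (pvLoop (pvAliasList m) l (2, d)).2 =
      match pvFindExact (pvAliases m) l with
      | some v => v
      | none =>
        match pvFindSub (pvAliases m) l with
        | some v => v
        | none => d := by
  induction l with
  | nil => rfl
  | cons kv t ih =>
    obtain ⟨k, v⟩ := kv
    by_cases he : pvExactHit (pvAliases m) k = true
    · have h0 := (rank_cases m k).1 he
      simp [pvLoop, pvFindExact, h0, he]
    · by_cases hs : pvSubHit (pvAliases m) k = true
      · have h1 := (rank_cases m k).2.1 he hs
        have : pvLoop (pvAliasList m) ((k, v) :: t) (2, d) = pvLoop (pvAliasList m) t (1, v) := by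
          simp [pvLoop, h1]
        rw [this, loop1 m t v]
        simp only [pvFindExact, pvFindSub, if_neg he, if_pos hs]
        cases pvFindExact (pvAliases m) t <;> simp
      · have h2 := (rank_cases m k).2.2 he hs
        have : pvLoop (pvAliasList m) ((k, v) :: t) (2, d) = pvLoop (pvAliasList m) t (2, d) := by
          simp [pvLoop, h2]
        rw [this, ih]
        simp only [pvFindExact, pvFindSub, if_neg he, if_neg hs]

-- ===== VERDICT (by name: the statement is the Claim_ definition above) =====
theorem match_model_limit_py_spec : Claim_equal_match_model_limit_py := by
  intro model_id limits default _
  unfold Spec_match_model_limit_py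
  simp only [match_model_limit_py, match_model_limit_py_alt]
  rw [loop2 model_id limits default]
  by_cases hnil : limits = []
  · subst hnil
    simp [pvFindExact, pvFindSub]
  · rw [if_neg hnil]
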